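-- pv_equiv track=rewrite | github.com/xplore-run/rag-reader | src/pdf_processor/text_chunker.py | _get_page_numbers
-- ===== SOURCE A (Python) =====
-- from typing import List, Dict, Optional, Tuple
--
-- def _get_page_numbers(
--
--     start_pos: int,
--     end_pos: int,
--     page_mapping: Dict[int, str]
-- ) -> List[int]:
--     """
--     Determine which pages a chunk spans.
--
--     Args:
--         start_pos: Start character position
--         end_pos: End character position
--         page_mapping: Mapping of character positions to page numbers
--
--     Returns:
--         List of page numbers
--     """
--     pages = set()
--     for pos in range(start_pos, end_pos):
--         if pos in page_mapping:
--             pages.add(page_mapping[pos])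
--     return sorted(list(pages))
-- ===== SOURCE B (Python) =====
-- from typing import List, Dict
--
-- def _get_page_numbers(
--     start_pos: int,
--     end_pos: int,
--     page_mapping: Dict[int, str]
-- ) -> List[int]:
--     return sorted({page for pos, page in page_mapping.items()
--                    if start_pos <= pos < end_pos})
-- ===== Notes on version B (the rewrite author's own statement) =====
-- stated objective: simpler
-- what changed: B is a one-line pass over page_mapping.items() keeping pages whose position falls in [start_pos, end_pos), instead of scanning every integer in range(start_pos, end_pos) and probing the dict; cost depends on the dict size rather than the range width.
import Mathlib
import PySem

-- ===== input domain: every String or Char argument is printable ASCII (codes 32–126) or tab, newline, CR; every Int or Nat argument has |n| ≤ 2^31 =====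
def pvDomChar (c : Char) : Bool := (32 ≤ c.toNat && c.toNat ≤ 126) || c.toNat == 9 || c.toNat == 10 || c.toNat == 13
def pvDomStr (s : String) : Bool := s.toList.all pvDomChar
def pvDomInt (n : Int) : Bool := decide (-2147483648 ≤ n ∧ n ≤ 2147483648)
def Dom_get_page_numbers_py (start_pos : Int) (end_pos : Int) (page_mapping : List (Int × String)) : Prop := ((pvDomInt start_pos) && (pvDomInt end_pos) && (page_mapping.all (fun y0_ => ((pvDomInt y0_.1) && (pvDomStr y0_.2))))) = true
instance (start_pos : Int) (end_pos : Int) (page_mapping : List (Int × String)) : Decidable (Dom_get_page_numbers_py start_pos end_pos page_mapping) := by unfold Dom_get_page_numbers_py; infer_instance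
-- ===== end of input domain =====

-- B collects pages by one pass over the dict's items filtered by the range, instead of
-- probing the dict at every integer position of the range (objective: simpler).


-- ===== PORT A =====
def get_page_numbers_py (start_pos : Int) (end_pos : Int) (page_mapping : List (Int × String)) : List String :=
  let d : PySem.Dict Int String := PySem.Dict.mk page_mapping
  let pages : PySem.Set String :=
    (PySem.List.pyRange start_pos end_pos 1).foldl
      (fun pages pos =>
        match d.get? pos with        -- `if pos in page_mapping: pages.add(page_mapping[pos])`
        | some p => PySem.Set.add pages p
        | none => pages)
      PySem.Set.empty
  PySem.List.sorted pages (fun x => x) false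

-- ===== PORT B =====
def get_page_numbers_py_alt (start_pos : Int) (end_pos : Int) (page_mapping : List (Int × String)) : List String :=
  PySem.List.sorted
    (page_mapping.foldl
      (fun pages kv =>
        if start_pos ≤ kv.1 ∧ kv.1 < end_pos then PySem.Set.add pages kv.2 else pages)
      PySem.Set.empty)
    (fun x => x) false

-- ===== PRECONDITION & SPEC =====
-- Pre_ only states the invariant every Python dict argument has: its keys are distinct.
-- (A List (Int × String) with a repeated key corresponds to no Python dict input.)
def Pre_get_page_numbers_py (start_pos : Int) (end_pos : Int) (page_mapping : List (Int × String)) : Prop :=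
  (page_mapping.map Prod.fst).Nodup
instance (start_pos : Int) (end_pos : Int) (page_mapping : List (Int × String)) : Decidable (Pre_get_page_numbers_py start_pos end_pos page_mapping) := by unfold Pre_get_page_numbers_py; infer_instance

def pvWitness_get_page_numbers_py : Int × Int × (List (Int × String)) := (0, 3, [(1, "p1"), (2, "p2")])

def Spec_get_page_numbers_py (start_pos : Int) (end_pos : Int) (page_mapping : List (Int × String)) (out : List String) : Prop := out = get_page_numbers_py_alt start_pos end_pos page_mapping
instance (start_pos : Int) (end_pos : Int) (page_mapping : List (Int × String)) (out : List String) : Decidable (Spec_get_page_numbers_py start_pos end_pos page_mapping out) := by unfold Spec_get_page_numbers_py; infer_instance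

-- ===== CLAIM (what is proved, stated in full; the proofs are below) =====
def Claim_equal_get_page_numbers_py : Prop := ∀ (start_pos : Int) (end_pos : Int) (page_mapping : List (Int × String)), Dom_get_page_numbers_py start_pos end_pos page_mapping → Pre_get_page_numbers_py start_pos end_pos page_mapping → Spec_get_page_numbers_py start_pos end_pos page_mapping (get_page_numbers_py start_pos end_pos page_mapping)

-- ===== LEMMAS AND PROOFS =====

-- membership in A's accumulation loop
theorem memA {xs : List Int} {d : PySem.Dict Int String} {s : PySem.Set String} {p : String} :
    p ∈ xs.foldl (fun pages pos =>
        match d.get? pos with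
        | some q => PySem.Set.add pages q
        | none => pages) s ↔ p ∈ s ∨ ∃ pos ∈ xs, d.get? pos = some p := by
  induction xs generalizing s with
  | nil => simp
  | cons x xs ih =>
    simp only [List.foldl_cons, ih, List.mem_cons]
    cases h : d.get? x with
    | none =>
      constructor
      · rintro (hs | ⟨pos, hm, hg⟩)
        · exact Or.inl hs
        · exact Or.inr ⟨pos, Or.inr hm, hg⟩
      · rintro (hs | ⟨pos, (rfl | hm), hg⟩)
        · exact Or.inl hs
        · simp [h] at hg
        · exact Or.inr ⟨pos, hm, hg⟩
    | some q =>
      rw [PySem.Set.mem_add]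
      constructor
      · rintro ((hs | rfl) | ⟨pos, hm, hg⟩)
        · exact Or.inl hs
        · exact Or.inr ⟨x, Or.inl rfl, h⟩
        · exact Or.inr ⟨pos, Or.inr hm, hg⟩
      · rintro (hs | ⟨pos, (rfl | hm), hg⟩)
        · exact Or.inl (Or.inl hs)
        · rw [h] at hg; exact Or.inl (Or.inr (Option.some.inj hg).symm)
        · exact Or.inr ⟨pos, hm, hg⟩

-- membership in B's accumulation loop
theorem memB {m : List (Int × String)} {a b : Int} {s : PySem.Set String} {p : String} :
    p ∈ m.foldl (fun pages kv =>
        if a ≤ kv.1 ∧ kv.1 < b then PySem.Set.add pages kv.2 else pages) s ↔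
      p ∈ s ∨ ∃ kv ∈ m, (a ≤ kv.1 ∧ kv.1 < b) ∧ kv.2 = p := by
  induction m generalizing s with
  | nil => simp
  | cons kv m ih =>
    simp only [List.foldl_cons, ih, List.mem_cons]
    split_ifs with h
    · rw [PySem.Set.mem_add]
      constructor
      · rintro ((hs | rfl) | ⟨kv', hm, hr, rfl⟩)
        · exact Or.inl hs
        · exact Or.inr ⟨kv, Or.inl rfl, h, rfl⟩
        · exact Or.inr ⟨kv', Or.inr hm, hr, rfl⟩
      · rintro (hs | ⟨kv', (rfl | hm), hr, rfl⟩)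
        · exact Or.inl (Or.inl hs)
        · exact Or.inl (Or.inr rfl)
        · exact Or.inr ⟨kv', hm, hr, rfl⟩
    · constructor
      · rintro (hs | ⟨kv', hm, hr, rfl⟩)
        · exact Or.inl hs
        · exact Or.inr ⟨kv', Or.inr hm, hr, rfl⟩
      · rintro (hs | ⟨kv', (rfl | hm), hr, rfl⟩)
        · exact Or.inl hs
        · exact absurd hr h
        · exact Or.inr ⟨kv', hm, hr, rfl⟩

-- A's loop keeps the pages set duplicate-free
theorem nodupA {xs : List Int} {d : PySem.Dict Int String} {s : PySem.Set String}
    (hs : s.Nodup) :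
    (xs.foldl (fun pages pos =>
        match d.get? pos with
        | some q => PySem.Set.add pages q
        | none => pages) s).Nodup := by
  induction xs generalizing s with
  | nil => exact hs
  | cons x xs ih =>
    simp only [List.foldl_cons]
    cases h : d.get? x with
    | none => exact ih hs
    | some q => exact ih (PySem.Set.nodup_add _ _ hs)

-- B's loop keeps the pages set duplicate-free
theorem nodupB {m : List (Int × String)} {a b : Int} {s : PySem.Set String}
    (hs : s.Nodup) :
    (m.foldl (fun pages kv =>
        if a ≤ kv.1 ∧ kv.1 < b then PySem.Set.add pages kv.2 else pages) s).Nodup := by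
  induction m generalizing s with
  | nil => exact hs
  | cons kv m ih =>
    simp only [List.foldl_cons]
    split_ifs
    · exact ih (PySem.Set.nodup_add _ _ hs)
    · exact ih hs

-- with distinct keys, a dict lookup succeeds exactly on the stored pairs
theorem get?_mk_eq_some {m : List (Int × String)} (hnd : (m.map Prod.fst).Nodup)
    {k : Int} {p : String} : (PySem.Dict.mk m).get? k = some p ↔ (k, p) ∈ m := by
  induction m with
  | nil => simp [PySem.Dict.get?]
  | cons kv m ih =>
    obtain ⟨k', v'⟩ := kv
    simp only [List.map_cons, List.nodup_cons] at hnd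
    rw [PySem.Dict.get?_mk_cons]
    by_cases hk : k' = k
    · subst hk
      simp only [beq_self_eq_true, if_true, List.mem_cons, Option.some.injEq, Prod.mk.injEq,
        true_and]
      constructor
      · rintro rfl; exact Or.inl rfl
      · rintro (rfl | hm)
        · rfl
        · exact absurd (List.mem_map_of_mem hm) hnd.1
    · simp only [beq_iff_eq, hk, if_false, ih hnd.2, List.mem_cons, Prod.mk.injEq]
      constructor
      · exact Or.inr
      · rintro (⟨rfl, -⟩ | hm)
        · exact absurd rfl hk
        · exact hm

-- ===== VERDICT (by name: the statement is the Claim_ definition above) =====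
theorem get_page_numbers_py_spec : Claim_equal_get_page_numbers_py := by
  intro start_pos end_pos page_mapping _hdom hpre
  unfold Spec_get_page_numbers_py get_page_numbers_py get_page_numbers_py_alt
  apply PySem.List.sorted_eq_sorted_of_perm _ _ _ (fun _ _ h => h)
  apply (List.perm_ext_iff_of_nodup (nodupA List.nodup_nil) (nodupB List.nodup_nil)).mpr
  intro p
  rw [memA, memB]
  simp only [List.not_mem_nil, false_or]
  constructor
  · rintro ⟨pos, hr, hg⟩
    rw [PySem.List.mem_pyRange_one] at hr
    exact ⟨(pos, p), (get?_mk_eq_some hpre).mp hg, hr, rfl⟩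
  · rintro ⟨⟨k, v⟩, hm, hr, rfl⟩
    exact ⟨k, PySem.List.mem_pyRange_one.mpr hr, (get?_mk_eq_some hpre).mpr hm⟩
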